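-- pv_equiv track=rewrite | github.com/gogotape/yandex_algorithms_6.0 | homework2/taskD/taskD.py | calc_min_days_for_vacation
-- ===== SOURCE A (Python) =====
-- def calc_min_days_for_vacation(
--         k: int,
--         directions: list[int],
-- ) -> int:
--
--     directions.sort()
--
--     l, r = 0, 1
--     max_days = 1
--
--     while r < len(directions):
--         diff = abs(directions[r] - directions[l])
--         if diff <= k:
--             max_days = max(max_days, r - l + 1)
--         else:
--             l += 1
--         r += 1
--
--     return max_days
-- ===== SOURCE B (Python) =====
-- import bisect
--
--
-- def calc_min_days_for_vacation(
--         k: int,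
--         directions: list[int],
-- ) -> int:
--
--     directions.sort()
--
--     answer = 1
--     for r in range(len(directions)):
--         l = bisect.bisect_left(directions, directions[r] - k)
--         answer = max(answer, r - l + 1)
--
--     return answer
-- ===== Notes on version B (the rewrite author's own statement) =====
-- stated objective: alternative
-- what changed: Replaced the monotone two-pointer while-loop (shared left index advanced across iterations) by an independent per-index binary search: for each r, bisect_left finds the leftmost element >= directions[r]-k and the window length r-l+1 is maxed into the answer.
import Mathlib
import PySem

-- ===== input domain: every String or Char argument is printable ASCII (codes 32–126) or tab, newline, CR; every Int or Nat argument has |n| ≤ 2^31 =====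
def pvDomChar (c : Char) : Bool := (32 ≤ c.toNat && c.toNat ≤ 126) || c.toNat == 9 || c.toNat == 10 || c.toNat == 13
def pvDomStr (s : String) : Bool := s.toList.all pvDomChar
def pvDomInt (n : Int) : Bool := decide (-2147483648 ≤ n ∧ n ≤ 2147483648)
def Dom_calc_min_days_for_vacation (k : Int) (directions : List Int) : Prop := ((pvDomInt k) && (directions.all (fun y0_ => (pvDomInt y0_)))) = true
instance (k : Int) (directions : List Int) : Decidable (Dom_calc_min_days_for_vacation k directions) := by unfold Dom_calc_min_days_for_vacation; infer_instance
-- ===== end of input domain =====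

-- B replaces A's shared two-pointer sweep by an independent bisect_left per right index
-- (an alternative algorithm of the same cost; equivalence is about the RETURN value —
-- both Pythons sort the argument list in place, the same observable mutation).

-- ===== PORT A =====
-- the while loop: state (l, r, max_days), r advances every step, l only on a failed window test
def pvALoop (k : Int) (d : List Int) (l r : Nat) (m : Int) : Int :=
  if h : r < d.length then
    if |d.getD r 0 - d.getD l 0| ≤ k then
      pvALoop k d l (r + 1) (max m ((r : Int) - (l : Int) + 1))
    else
      pvALoop k d (l + 1) (r + 1) m
  else m
termination_by d.length - r
decreasing_by all_goals omega

def calc_min_days_for_vacation (k : Int) (directions : List Int) : Int :=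
  pvALoop k (PySem.List.sorted directions (fun x => x)) 0 1 1

-- ===== PORT B =====
-- for each r, bisect_left gives the leftmost index l with d[l] >= d[r] - k
def calc_min_days_for_vacation_alt (k : Int) (directions : List Int) : Int :=
  let d := PySem.List.sorted directions (fun x => x)
  (List.range d.length).foldl
    (fun (answer : Int) (r : Nat) =>
      max answer ((r : Int) - (PySem.List.bisectLeft d (d.getD r 0 - k) : Int) + 1)) 1

-- ===== PRECONDITION & SPEC =====
def Spec_calc_min_days_for_vacation (k : Int) (directions : List Int) (out : Int) : Prop := out = calc_min_days_for_vacation_alt k directions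
instance (k : Int) (directions : List Int) (out : Int) : Decidable (Spec_calc_min_days_for_vacation k directions out) := by unfold Spec_calc_min_days_for_vacation; infer_instance

-- ===== CLAIM (what is proved, stated in full; the proofs are below) =====
def Claim_equal_calc_min_days_for_vacation : Prop := ∀ (k : Int) (directions : List Int), Dom_calc_min_days_for_vacation k directions → Spec_calc_min_days_for_vacation k directions (calc_min_days_for_vacation k directions)

-- ===== LEMMAS AND PROOFS =====

-- the step function of B's fold
def pvF (k : Int) (d : List Int) (a : Int) (r : Nat) : Int :=
  max a ((r : Int) - (PySem.List.bisectLeft d (d.getD r 0 - k) : Int) + 1)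

lemma pvMono (d : List Int) (hs : List.Pairwise (· ≤ ·) d) {i j : Nat}
    (hij : i ≤ j) (hj : j < d.length) : d.getD i 0 ≤ d.getD j 0 := by
  rcases Nat.lt_or_ge i j with h | h
  · rw [List.getD_eq_getElem d 0 (Nat.lt_trans h hj), List.getD_eq_getElem d 0 hj]
    exact (List.pairwise_iff_getElem.mp hs) i j _ hj h
  · have : i = j := Nat.le_antisymm hij h
    simp [this]

lemma pvALoop_fold (k : Int) (d : List Int) (hs : List.Pairwise (· ≤ ·) d) :
    ∀ (t r l : Nat) (m : Int), d.length - r = t → 1 ≤ r → r ≤ d.length → l < r →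
      (r : Int) - (l : Int) ≤ m →
      (l = 0 ∨ d.getD (r - 1) 0 - d.getD (l - 1) 0 > k) →
      m = List.foldl (pvF k d) 1 (List.range' 1 (r - 1)) →
      pvALoop k d l r m = List.foldl (pvF k d) 1 (List.range' 1 (d.length - 1)) := by
  intro t
  induction t with
  | zero =>
    intro r l m ht _ hrn _ _ _ hm
    have hr : r = d.length := by omega
    rw [pvALoop]
    rw [dif_neg (by omega)]
    rw [hm, hr]
  | succ t ih =>
    intro r l m ht hr1 hrn hlr hlb hC hm
    have hrlt : r < d.length := by omega
    have hllt : l < d.length := by omega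
    have hmono : d.getD l 0 ≤ d.getD r 0 := pvMono d hs (Nat.le_of_lt hlr) hrlt
    have habs : |d.getD r 0 - d.getD l 0| = d.getD r 0 - d.getD l 0 :=
      abs_of_nonneg (by omega)
    obtain ⟨hL1, hL2, hL3⟩ := PySem.List.bisectLeft_spec d (d.getD r 0 - k) hs
    have hfold : List.range' 1 r = List.range' 1 (r - 1) ++ [r] := by
      have : r = (r - 1) + 1 := by omega
      rw [this, List.range'_concat]
      congr 2
      omega
    rw [pvALoop, dif_pos hrlt, habs]
    by_cases hc : d.getD r 0 - d.getD l 0 ≤ k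
    · rw [if_pos hc]
      -- here l is exactly bisectLeft d (d[r] - k)
      have hLle : PySem.List.bisectLeft d (d.getD r 0 - k) ≤ l := by
        by_contra h
        have := hL2 l hllt (by omega)
        rw [List.getD_eq_getElem d 0 hllt] at hc
        omega
      have hlle : l ≤ PySem.List.bisectLeft d (d.getD r 0 - k) := by
        rcases hC with h0 | hgt
        · omega
        · have hl1 : l - 1 < d.length := by omega
          have hmono' : d.getD (r - 1) 0 ≤ d.getD r 0 := pvMono d hs (by omega) hrlt
          by_contra h
          have := hL3 (l - 1) hl1 (by omega)
          rw [List.getD_eq_getElem d 0 hl1] at hgt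
          omega
      have hlL : l = PySem.List.bisectLeft d (d.getD r 0 - k) := by omega
      apply ih (r + 1) l (max m ((r : Int) - (l : Int) + 1)) (by omega) (by omega)
        (by omega) (by omega)
      · have : (r : Int) - (l : Int) + 1 ≤ max m ((r : Int) - (l : Int) + 1) :=
          le_max_right _ _
        omega
      · rcases hC with h0 | hgt
        · exact Or.inl h0
        · refine Or.inr ?_
          have hmono' : d.getD (r - 1) 0 ≤ d.getD r 0 := pvMono d hs (by omega) hrlt
          simp only [Nat.add_sub_cancel]
          omega
      · simp only [Nat.add_sub_cancel]
        rw [hfold, List.foldl_append, ← hm]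
        simp only [List.foldl_cons, List.foldl_nil, pvF]
        rw [hlL]
    · rw [if_neg hc]
      -- window invalid: l < bisectLeft, so this r's best window is ≤ m already
      have hlL : l < PySem.List.bisectLeft d (d.getD r 0 - k) := by
        by_contra h
        have := hL3 l hllt (by omega)
        rw [List.getD_eq_getElem d 0 hllt] at hc
        omega
      apply ih (r + 1) (l + 1) m (by omega) (by omega) (by omega) (by omega)
      · push_cast
        omega
      · refine Or.inr ?_
        simp only [Nat.add_sub_cancel]
        omega
      · simp only [Nat.add_sub_cancel]
        rw [hfold, List.foldl_append, ← hm]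
        simp only [List.foldl_cons, List.foldl_nil, pvF]
        have : (r : Int) - (PySem.List.bisectLeft d (d.getD r 0 - k) : Int) + 1 ≤ m := by
          push_cast
          omega
        omega

-- ===== VERDICT (by name: the statement is the Claim_ definition above) =====
theorem calc_min_days_for_vacation_spec : Claim_equal_calc_min_days_for_vacation := by
  intro k directions _
  unfold Spec_calc_min_days_for_vacation calc_min_days_for_vacation calc_min_days_for_vacation_alt
  set d := PySem.List.sorted directions (fun x => x) with hd
  have hs : List.Pairwise (· ≤ ·) d := PySem.List.sorted_pairwise directions (fun x => x)
  rcases Nat.eq_zero_or_pos d.length with h0 | hpos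
  · rw [pvALoop, dif_neg (by omega)]
    show (1 : Int) = List.foldl (fun (answer : Int) (r : Nat) =>
      max answer ((r : Int) - (PySem.List.bisectLeft d (d.getD r 0 - k) : Int) + 1)) 1
      (List.range d.length)
    rw [h0]
    rfl
  · have hA := pvALoop_fold k d hs (d.length - 1) 1 0 1 (by omega) le_rfl hpos
      Nat.one_pos (by norm_num) (Or.inl rfl) (by simp [List.range'])
    rw [hA]
    show List.foldl (pvF k d) 1 (List.range' 1 (d.length - 1)) =
      List.foldl (fun (answer : Int) (r : Nat) =>
        max answer ((r : Int) - (PySem.List.bisectLeft d (d.getD r 0 - k) : Int) + 1)) 1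
        (List.range d.length)
    have hrange : List.range d.length = 0 :: List.range' 1 (d.length - 1) := by
      conv_lhs => rw [show d.length = (d.length - 1) + 1 from by omega]
      rw [List.range_eq_range', List.range'_succ]
    rw [hrange]
    simp only [List.foldl_cons]
    have h1 : max (1 : Int) (((0 : Nat) : Int) - (PySem.List.bisectLeft d (d.getD 0 0 - k) : Int) + 1) = 1 := by
      apply max_eq_left
      push_cast
      omega
    rw [h1]
    rfl
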